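-- pv_equiv track=rewrite | github.com/D31T4/COMP6841-project | afl_fuzz/afl/mutation.py | could_be_bitflip
-- ===== SOURCE A (Python) =====
-- def could_be_bitflip(x: int) -> bool:
--     sh = 0
--
--     if not x: return True
--
--     # shift left until first bit set
--     while not (x & 1):
--         sh += 1
--         x >>= 1
--
--     # 1-, 2-, and 4-bit patterns are ok anywhere
--     if x == 1 or x == 3 or x == 15: return True
--
--     # 8-, 16-, and 32-bit patterns are ok only if shift factor
--     # is divisible by 8, since that's the stepover for these ops
--     if sh & 7: return False
--
--
--     if x == 0xff or x == 0xffff or x == 0xffffffff: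
--         return True
--
--     return False
-- ===== SOURCE B (Python) =====
-- def could_be_bitflip(x: int) -> bool:
--     if x == 0:
--         return True
--     tz = (x & -x).bit_length() - 1
--     y = x >> tz
--     if y & (y + 1):
--         return False
--     run = (y + 1).bit_length() - 1
--     return run in (1, 2, 4) or (run in (8, 16, 32) and tz & 7 == 0)
-- ===== Notes on version B (the rewrite author's own statement) =====
-- stated objective: alternative
-- what changed: B replaces A's shift-one-bit-at-a-time while loop followed by comparisons against a table of six literal bit patterns by a branch-free bit computation: trailing zeros via the low-bit trick, a contiguous-ones test, and a computed run length that is checked for the allowed run sizes, byte-aligned-shift-gated for the wide ones.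
import Mathlib
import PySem

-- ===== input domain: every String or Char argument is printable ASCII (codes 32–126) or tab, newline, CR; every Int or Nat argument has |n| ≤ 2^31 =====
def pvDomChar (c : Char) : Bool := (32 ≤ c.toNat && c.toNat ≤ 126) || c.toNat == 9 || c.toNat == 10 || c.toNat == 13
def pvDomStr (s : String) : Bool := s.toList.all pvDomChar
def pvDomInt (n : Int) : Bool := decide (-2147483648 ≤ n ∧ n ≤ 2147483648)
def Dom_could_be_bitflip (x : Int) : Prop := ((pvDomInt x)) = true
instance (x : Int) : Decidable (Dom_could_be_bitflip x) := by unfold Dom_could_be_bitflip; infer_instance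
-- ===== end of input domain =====

-- B replaces A's shift-loop-plus-literal-table by a branch-free contiguous-ones-run computation; alternative decomposition, same exact results.

-- ===== PORT A =====
-- A's `while not (x & 1): sh += 1; x >>= 1` loop; fuel x.natAbs is enough for any
-- x ≠ 0 (the loop runs at most log2 |x| < |x| times), so the port is exact there.
def bitflipShift : Nat → Int → Int → Int × Int
  | 0, sh, x => (sh, x)
  | fuel+1, sh, x =>
    if PySem.Int.band x 1 == 0 then bitflipShift fuel (sh + 1) (x >>> (1:Nat)) else (sh, x)

def could_be_bitflip (x : Int) : Bool :=
  if x == 0 then true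
  else
    let p := bitflipShift x.natAbs 0 x
    let sh := p.1
    let x := p.2
    if x == 1 || x == 3 || x == 15 then true
    else if PySem.Int.band sh 7 != 0 then false
    else if x == 255 || x == 65535 || x == 4294967295 then true
    else false

-- ===== PORT B =====
-- tz = (x & -x).bit_length() - 1 is a Nat here (bitLength returns Nat and is ≥ 1 for
-- x ≠ 0, so the Nat subtraction is Python-exact), which also serves as the shift count.
def could_be_bitflip_alt (x : Int) : Bool :=
  if x == 0 then true
  else
    let tz : Nat := PySem.Int.bitLength (PySem.Int.band x (-x)) - 1
    let y := x >>> tz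
    if PySem.Int.band y (y + 1) != 0 then false
    else
      let run : Int := (PySem.Int.bitLength (y + 1) : Int) - 1
      (run == 1 || run == 2 || run == 4) ||
        ((run == 8 || run == 16 || run == 32) && PySem.Int.band (tz : Int) 7 == 0)

-- ===== PRECONDITION & SPEC =====
def Spec_could_be_bitflip (x : Int) (out : Bool) : Prop := out = could_be_bitflip_alt x
instance (x : Int) (out : Bool) : Decidable (Spec_could_be_bitflip x out) := by unfold Spec_could_be_bitflip; infer_instance

-- ===== CLAIM (what is proved, stated in full; the proofs are below) =====
def Claim_equal_could_be_bitflip : Prop := ∀ (x : Int), Dom_could_be_bitflip x → Spec_could_be_bitflip x (could_be_bitflip x)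

-- ===== LEMMAS AND PROOFS =====

theorem pvAndMod2 (m n : Nat) : (m &&& n) % 2 = (m % 2) * (n % 2) := by
  have h : (m &&& n) % 2 = 1 ↔ (m % 2 = 1 ∧ n % 2 = 1) := by
    simpa using Nat.testBit_and m n 0
  rcases Nat.mod_two_eq_zero_or_one m with h1|h1 <;> rcases Nat.mod_two_eq_zero_or_one n with h2|h2 <;>
    rw [h1, h2] at h ⊢ <;> omega
theorem pvOrMod2 (m n : Nat) : (m ||| n) % 2 = (m % 2 + n % 2) - (m % 2) * (n % 2) := by
  have h : (m ||| n) % 2 = 1 ↔ (m % 2 = 1 ∨ n % 2 = 1) := by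
    simpa using Nat.testBit_or m n 0
  rcases Nat.mod_two_eq_zero_or_one m with h1|h1 <;> rcases Nat.mod_two_eq_zero_or_one n with h2|h2 <;>
    rw [h1, h2] at h ⊢ <;> omega
theorem pvN1 (m n : Nat) : m &&& n = 2 * ((m/2) &&& (n/2)) + (m%2) * (n%2) := by
  have h1 := Nat.and_div_two (a := m) (b := n)
  have h2 := pvAndMod2 m n
  rcases Nat.mod_two_eq_zero_or_one m with h3|h3 <;> rcases Nat.mod_two_eq_zero_or_one n with h4|h4 <;>
    rw [h3, h4] at h2 ⊢ <;> omega
theorem pvN2 (m n : Nat) : m ||| n = 2 * ((m/2) ||| (n/2)) + ((m%2 + n%2) - (m%2) * (n%2)) := by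
  have h1 := Nat.or_div_two (a := m) (b := n)
  have h2 := pvOrMod2 m n
  rcases Nat.mod_two_eq_zero_or_one m with h3|h3 <;> rcases Nat.mod_two_eq_zero_or_one n with h4|h4 <;>
    rw [h3, h4] at h2 ⊢ <;> omega
theorem pvBandPN (a b : Nat) : PySem.Int.band (↑a) (Int.negSucc b) = ((a - (a &&& b) : Nat) : Int) := by
  simp [PySem.Int.band]
theorem pvBandNP (a b : Nat) : PySem.Int.band (Int.negSucc a) (↑b) = ((b - (b &&& a) : Nat) : Int) := by
  simp [PySem.Int.band]
theorem pvBandNN (a b : Nat) : PySem.Int.band (Int.negSucc a) (Int.negSucc b) = Int.negSucc (a ||| b) := by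
  simp [PySem.Int.band, Int.negSucc_eq]; omega
-- AND of a Nat with its predecessor: clears the low run bit contribution
theorem pvAndPred (m : Nat) (h : m % 2 = 1) : m &&& (m - 1) = m - 1 := by
  have hN := pvN1 m (m - 1)
  have hd : (m - 1) / 2 = m / 2 := by omega
  have h2 : (m - 1) % 2 = 0 := by omega
  rw [hd, h2, h, Nat.and_self] at hN
  omega
theorem pvAndSucc (m : Nat) (h : m % 2 = 0) : m &&& (m + 1) = m := by
  have hN := pvN1 m (m + 1)
  have hd : (m + 1) / 2 = m / 2 := by omega
  have h2 : (m + 1) % 2 = 1 := by omega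
  rw [hd, h2, h, Nat.and_self] at hN
  omega
theorem pvB1 (x : Int) (h : x % 2 = 1) : PySem.Int.band x (-x) = 1 := by
  rcases x with m | a
  · simp only [Int.ofNat_eq_natCast] at h ⊢
    have hm : m % 2 = 1 := by omega
    rw [show -((m:Int)) = Int.negSucc (m - 1) by rw [Int.negSucc_eq]; omega, pvBandPN,
        pvAndPred m hm]
    have : m - (m - 1) = 1 := by omega
    rw [this]; rfl
  · have ha : a % 2 = 0 := by simp [Int.negSucc_eq] at h; omega
    have hp := pvAndPred (a+1) (by omega)
    rw [Nat.add_sub_cancel] at hp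
    rw [show -(Int.negSucc a) = ((a + 1 : Nat) : Int) by rw [Int.negSucc_eq]; push_cast; ring,
        pvBandNP, hp, show (a + 1) - a = 1 by omega]
    rfl
theorem pvB2 (x : Int) (h : x % 2 = 0) (hx : x ≠ 0) :
    PySem.Int.band x (-x) = 2 * PySem.Int.band (x >>> (1:Nat)) (-(x >>> (1:Nat))) := by
  rcases x with m | a
  · simp only [Int.ofNat_eq_natCast] at h hx ⊢
    have hm : m % 2 = 0 := by omega
    have hm2 : 2 ≤ m := by
      rcases Nat.eq_zero_or_pos m with h0 | h0
      · exfalso; apply hx; rw [h0]; rfl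
      · omega
    have hsr : ((m:Int)) >>> (1:Nat) = ((m / 2 : Nat) : Int) := by
      show Int.ofNat (m >>> 1) = _
      rw [Nat.shiftRight_succ, Nat.shiftRight_zero]; rfl
    rw [hsr, show -((m:Int)) = Int.negSucc (m - 1) by rw [Int.negSucc_eq]; omega,
        show -(((m/2 : Nat) : Int)) = Int.negSucc (m/2 - 1) by rw [Int.negSucc_eq]; omega,
        pvBandPN, pvBandPN]
    have hN := pvN1 m (m - 1)
    have hle : m &&& (m - 1) ≤ m := Nat.and_le_left
    have hle2 : (m/2) &&& (m/2 - 1) ≤ m/2 := Nat.and_le_left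
    have hd : (m - 1) / 2 = m / 2 - 1 := by omega
    have h2 : (m - 1) % 2 = 1 := by omega
    rw [hd, h2, hm] at hN
    push_cast
    omega
  · have ha : a % 2 = 1 := by simp [Int.negSucc_eq] at h; omega
    have hsr : (Int.negSucc a) >>> (1:Nat) = Int.negSucc (a / 2) := by
      show Int.negSucc (a >>> 1) = _
      rw [Nat.shiftRight_succ, Nat.shiftRight_zero]
    rw [hsr, show -(Int.negSucc a) = ((a + 1 : Nat) : Int) by rw [Int.negSucc_eq]; push_cast; ring,
        show -(Int.negSucc (a/2)) = ((a/2 + 1 : Nat) : Int) by rw [Int.negSucc_eq]; push_cast; ring,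
        pvBandNP, pvBandNP]
    have hN := pvN1 (a + 1) a
    have hle : (a + 1) &&& a ≤ a + 1 := Nat.and_le_left
    have hle2 : (a/2 + 1) &&& (a/2) ≤ a/2 + 1 := Nat.and_le_left
    have hd : (a + 1) / 2 = a / 2 + 1 := by omega
    have h2 : (a + 1) % 2 = 0 := by omega
    rw [hd, h2, ha] at hN
    push_cast
    omega
theorem pvB3 (y : Int) (h : y % 2 = 1) :
    PySem.Int.band y (y + 1) = 2 * PySem.Int.band (y >>> (1:Nat)) ((y >>> (1:Nat)) + 1) := by
  rcases y with m | a
  · simp only [Int.ofNat_eq_natCast] at h ⊢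
    have hm : m % 2 = 1 := by omega
    have hsr : ((m:Int)) >>> (1:Nat) = ((m / 2 : Nat) : Int) := by
      show Int.ofNat (m >>> 1) = _
      rw [Nat.shiftRight_succ, Nat.shiftRight_zero]; rfl
    rw [hsr, show ((m:Int)) + 1 = ((m + 1 : Nat) : Int) by push_cast; ring,
        show (((m/2 : Nat) : Int)) + 1 = ((m/2 + 1 : Nat) : Int) by push_cast; ring,
        PySem.Int.band_natCast, PySem.Int.band_natCast]
    have hN := pvN1 m (m + 1)
    have hd : (m + 1) / 2 = m / 2 + 1 := by omega
    have h2 : (m + 1) % 2 = 0 := by omega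
    rw [hd, h2, hm] at hN
    push_cast
    omega
  · have ha : a % 2 = 0 := by simp [Int.negSucc_eq] at h; omega
    have hsr : (Int.negSucc a) >>> (1:Nat) = Int.negSucc (a / 2) := by
      show Int.negSucc (a >>> 1) = _
      rw [Nat.shiftRight_succ, Nat.shiftRight_zero]
    rcases Nat.eq_zero_or_pos a with h0 | h0
    · subst h0; rw [hsr]; decide
    · rw [hsr, show (Int.negSucc a) + 1 = Int.negSucc (a - 1) by
            rw [Int.negSucc_eq, Int.negSucc_eq]; omega,
          show (Int.negSucc (a/2)) + 1 = Int.negSucc (a/2 - 1) by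
            rw [Int.negSucc_eq, Int.negSucc_eq]; omega,
          pvBandNN, pvBandNN]
      have hN := pvN2 a (a - 1)
      have hd : (a - 1) / 2 = a / 2 - 1 := by omega
      have h2 : (a - 1) % 2 = 1 := by omega
      rw [hd, h2, ha] at hN
      rw [Int.negSucc_eq, Int.negSucc_eq]
      push_cast
      omega
theorem pvB4 (y : Int) (h : y % 2 = 0) (hy : y ≠ 0) : PySem.Int.band y (y + 1) ≠ 0 := by
  rcases y with m | a
  · simp only [Int.ofNat_eq_natCast] at h hy ⊢
    have hm : m % 2 = 0 := by omega
    have hm2 : 2 ≤ m := by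
      rcases Nat.eq_zero_or_pos m with h0 | h0
      · exfalso; apply hy; rw [h0]; rfl
      · omega
    rw [show ((m:Int)) + 1 = ((m + 1 : Nat) : Int) by push_cast; ring, PySem.Int.band_natCast,
        pvAndSucc m hm]
    exact_mod_cast (by omega : (m:Int) ≠ 0)
  · have ha : a % 2 = 1 := by simp [Int.negSucc_eq] at h; omega
    rw [show (Int.negSucc a) + 1 = Int.negSucc (a - 1) by rw [Int.negSucc_eq, Int.negSucc_eq]; omega,
        pvBandNN]
    exact Int.negSucc_ne_zero _

theorem pvMod2 (x : Int) : PySem.Int.mod x 2 = x % 2 := by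
  have h1 := PySem.Int.floordiv_mul_add_mod x 2
  rw [PySem.Int.floordiv_eq_ediv_of_pos (by omega)] at h1
  have h2 := PySem.Int.mod_nonneg (a := x) (b := 2) (by omega)
  have h3 := PySem.Int.mod_lt (a := x) (b := 2) (by omega)
  omega

theorem pvSR1 (x : Int) : x >>> (1:Nat) = x / 2 := by
  simpa using Int.shiftRight_eq_div_pow x 1

-- contiguity characterization: y & (y+1) = 0 iff y is -1 or 2^k - 1
theorem pvK : ∀ n : Nat, ∀ y : Int, y.natAbs = n →
    (PySem.Int.band y (y + 1) = 0 ↔ (y = -1 ∨ ∃ k : Nat, y = 2^k - 1)) := by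
  intro n
  induction n using Nat.strong_induction_on with
  | _ n IH =>
    intro y hn
    by_cases h0 : y = 0
    · subst h0
      constructor
      · intro _; exact Or.inr ⟨0, by norm_num⟩
      · intro _; decide
    by_cases hm1 : y = -1
    · subst hm1
      constructor
      · intro _; exact Or.inl rfl
      · intro _; norm_num
    rcases Int.emod_two_eq_zero_or_one y with hpar | hpar
    · -- even y ≠ 0: never contiguous, never of the stated form
      constructor
      · intro hc; exact absurd hc (pvB4 y hpar h0)
      · rintro (rfl | ⟨k, rfl⟩)
        · exact absurd rfl hm1
        · rcases Nat.eq_zero_or_pos k with rfl | hk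
          · exact absurd (by norm_num) h0
          · exfalso
            have : (2:Int)^k = 2 * 2^(k-1) := by
              conv_lhs => rw [show k = 1 + (k - 1) by omega]
              rw [pow_add]; ring
            omega
    · -- odd y
      have hrec := pvB3 y hpar
      rw [pvSR1] at hrec
      have hlt : (y / 2).natAbs < n := by omega
      have hIH := IH (y / 2).natAbs hlt (y / 2) rfl
      rw [hrec]
      constructor
      · intro hc
        have hc2 : PySem.Int.band (y/2) (y/2 + 1) = 0 := by omega
        rcases hIH.mp hc2 with hu | ⟨k, hu⟩
        · exfalso; omega
        · right
          refine ⟨k + 1, ?_⟩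
          have h2 : (2:Int)^(k+1) = 2 * 2^k := by rw [pow_succ]; ring
          omega
      · rintro (rfl | ⟨k, hy⟩)
        · exact absurd rfl hm1
        · rcases Nat.eq_zero_or_pos k with rfl | hk
          · exfalso; norm_num at hy; omega
          · have h2 : (2:Int)^k = 2 * 2^(k-1) := by
              conv_lhs => rw [show k = 1 + (k - 1) by omega]
              rw [pow_add]; ring
            have hu : y / 2 = 2^(k-1) - 1 := by omega
            have := hIH.mpr (Or.inr ⟨k - 1, hu⟩)
            omega

-- loop characterization: for x ≠ 0 the shift loop returns (sh + k, x >>> k)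
-- where x & -x = 2^k, and x >>> k is odd
theorem pvLB : ∀ n : Nat, ∀ x : Int, x.natAbs = n → x ≠ 0 →
    ∃ k : Nat, PySem.Int.band x (-x) = 2^k ∧ (x >>> k) % 2 = 1 ∧
      (∀ (sh : Int) (fuel : Nat), x.natAbs ≤ fuel →
        bitflipShift fuel sh x = (sh + k, x >>> k)) := by
  intro n
  induction n using Nat.strong_induction_on with
  | _ n IH =>
    intro x hn hx
    rcases Int.emod_two_eq_zero_or_one x with hpar | hpar
    · -- even: recurse on x >>> 1
      have hhalf : x >>> (1:Nat) = x / 2 := pvSR1 x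
      have hx2 : x / 2 ≠ 0 := by omega
      have hlt : (x / 2).natAbs < n := by omega
      obtain ⟨k, hb, hodd, hloop⟩ := IH (x/2).natAbs hlt (x/2) rfl hx2
      refine ⟨k + 1, ?_, ?_, ?_⟩
      · rw [pvB2 x hpar hx, hhalf, hb]; ring
      · rw [show (k + 1) = 1 + k by omega, Int.shiftRight_add, hhalf]; exact hodd
      · intro sh fuel hfuel
        have hfuel1 : 1 ≤ fuel := by omega
        obtain ⟨f, rfl⟩ : ∃ f, fuel = f + 1 := ⟨fuel - 1, by omega⟩
        show (if PySem.Int.band x 1 == 0 then bitflipShift f (sh + 1) (x >>> (1:Nat)) else (sh, x)) = _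
        rw [PySem.Int.band_one, pvMod2, hpar]
        simp only [BEq.rfl, if_true]
        rw [hhalf, hloop (sh + 1) f (by omega)]
        rw [show ((k:Nat) + 1 : Nat) = 1 + k by omega, Int.shiftRight_add, hhalf]
        simp only [Prod.mk.injEq]
        exact ⟨by push_cast; ring, trivial⟩
    · -- odd: the loop stops immediately
      refine ⟨0, ?_, ?_, ?_⟩
      · rw [pvB1 x hpar]; norm_num
      · simpa [Int.shiftRight_eq_div_pow] using hpar
      · intro sh fuel hfuel
        have hfuel1 : 1 ≤ fuel := by omega
        obtain ⟨f, rfl⟩ : ∃ f, fuel = f + 1 := ⟨fuel - 1, by omega⟩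
        show (if PySem.Int.band x 1 == 0 then bitflipShift f (sh + 1) (x >>> (1:Nat)) else (sh, x)) = _
        rw [PySem.Int.band_one, pvMod2, hpar]
        simp [Int.shiftRight_eq_div_pow]

-- bit_length of a power of two
theorem pvBLpow : ∀ k : Nat, PySem.Int.bitLength ((2:Int)^k) = k + 1 := by
  intro k
  induction k with
  | zero => decide
  | succ k ih =>
    have hcast : ((2:Int))^(k+1) = ((2^(k+1) : Nat) : Int) := by push_cast; ring
    rw [hcast, PySem.Int.bitLength_natCast (Nat.pow_pos (by omega))]
    have hd : (2^(k+1) : Nat) / 2 = 2^k := by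
      rw [Nat.pow_succ]; omega
    rw [hd]
    have hcast2 : (((2^k : Nat)) : Int) = (2:Int)^k := by push_cast; ring
    rw [hcast2, ih]

-- 2^j - 1 determines j
theorem pvPowLit (j m : Nat) (c : Int) (hc : (2:Int)^m - 1 = c) : ((2:Int)^j - 1 = c) ↔ j = m := by
  subst hc
  constructor
  · intro h
    have h2 : (2:Nat)^j = 2^m := by
      have : (2:Int)^j = 2^m := by omega
      exact_mod_cast this
    exact Nat.pow_right_injective (by omega) h2
  · rintro rfl; rfl

-- the main equivalence, for every integer
theorem pvMain (x : Int) : could_be_bitflip x = could_be_bitflip_alt x := by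
  by_cases hx : x = 0
  · subst hx; rfl
  obtain ⟨k, hb, hodd, hloop⟩ := pvLB x.natAbs x rfl hx
  have hx0 : (x == 0) = false := by simp [hx]
  rw [could_be_bitflip, could_be_bitflip_alt, hx0]
  simp only [Bool.false_eq_true, if_false]
  rw [hloop 0 x.natAbs le_rfl]
  rw [hb, pvBLpow k]
  simp only [Nat.add_sub_cancel, zero_add]
  set y := x >>> k with hy
  by_cases hc : PySem.Int.band y (y + 1) = 0
  · rcases (pvK y.natAbs y rfl).mp hc with hm1 | ⟨j, hyj⟩
    · -- y = -1
      rw [hm1] at hc ⊢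
      rw [hc]
      norm_num [PySem.Int.bitLength_zero]
    · -- y = 2^j - 1, j ≥ 1 since y is odd
      have hj : 1 ≤ j := by
        rcases Nat.eq_zero_or_pos j with rfl | h; · norm_num at hyj; omega
        · omega
      rw [hyj] at hc ⊢
      rw [hc]
      simp only [bne_self_eq_false, Bool.false_eq_true, if_false]
      have hy1 : (2:Int)^j - 1 + 1 = 2^j := by ring
      rw [hy1, pvBLpow j]
      have hrun : ((j:Int) + 1 - 1) = (j:Int) := by ring
      push_cast
      rw [hrun]
      have e1 : ((2:Int)^j - 1 == 1) = (j == 1) := by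
        rw [Bool.eq_iff_iff, beq_iff_eq, beq_iff_eq, pvPowLit j 1 1 (by norm_num)]
      have e2 : ((2:Int)^j - 1 == 3) = (j == 2) := by
        rw [Bool.eq_iff_iff, beq_iff_eq, beq_iff_eq, pvPowLit j 2 3 (by norm_num)]
      have e3 : ((2:Int)^j - 1 == 15) = (j == 4) := by
        rw [Bool.eq_iff_iff, beq_iff_eq, beq_iff_eq, pvPowLit j 4 15 (by norm_num)]
      have e4 : ((2:Int)^j - 1 == 255) = (j == 8) := by
        rw [Bool.eq_iff_iff, beq_iff_eq, beq_iff_eq, pvPowLit j 8 255 (by norm_num)]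
      have e5 : ((2:Int)^j - 1 == 65535) = (j == 16) := by
        rw [Bool.eq_iff_iff, beq_iff_eq, beq_iff_eq, pvPowLit j 16 65535 (by norm_num)]
      have e6 : ((2:Int)^j - 1 == 4294967295) = (j == 32) := by
        rw [Bool.eq_iff_iff, beq_iff_eq, beq_iff_eq, pvPowLit j 32 4294967295 (by norm_num)]
      have ej1 : ((j:Int) == 1) = (j == 1) := by
        rw [Bool.eq_iff_iff, beq_iff_eq, beq_iff_eq]; omega
      have ej2 : ((j:Int) == 2) = (j == 2) := by
        rw [Bool.eq_iff_iff, beq_iff_eq, beq_iff_eq]; omega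
      have ej4 : ((j:Int) == 4) = (j == 4) := by
        rw [Bool.eq_iff_iff, beq_iff_eq, beq_iff_eq]; omega
      have ej8 : ((j:Int) == 8) = (j == 8) := by
        rw [Bool.eq_iff_iff, beq_iff_eq, beq_iff_eq]; omega
      have ej16 : ((j:Int) == 16) = (j == 16) := by
        rw [Bool.eq_iff_iff, beq_iff_eq, beq_iff_eq]; omega
      have ej32 : ((j:Int) == 32) = (j == 32) := by
        rw [Bool.eq_iff_iff, beq_iff_eq, beq_iff_eq]; omega
      rw [e1, e2, e3, e4, e5, e6, ej1, ej2, ej4, ej8, ej16, ej32]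
      cases h1 : (j == 1) <;> cases h2 : (j == 2) <;> cases h4 : (j == 4) <;>
        cases h8 : (j == 8) <;> cases h16 : (j == 16) <;> cases h32 : (j == 32) <;>
        cases hk7 : (PySem.Int.band (k:Int) 7 == 0) <;> simp [bne, hk7]
  · -- y not a contiguous run of ones: both sides are false
    have hbne : (PySem.Int.band y (y + 1) != 0) = true := by simp [hc]
    rw [hbne]
    have hne : ∀ c : Int, PySem.Int.band c (c + 1) = 0 → (y == c) = false := by
      intro c hcc
      by_cases h : y = c
      · exact absurd (h ▸ hcc) hc
      · simp [h]
    rw [hne 1 (by decide), hne 3 (by decide), hne 15 (by decide),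
        hne 255 (by decide), hne 65535 (by decide), hne 4294967295 (by decide)]
    simp only [Bool.or_self, Bool.false_eq_true, if_false, if_true]
    cases hk7 : (PySem.Int.band (0 + (k:Int)) 7 != 0) <;> simp

-- ===== VERDICT (by name: the statement is the Claim_ definition above) =====
theorem could_be_bitflip_spec : Claim_equal_could_be_bitflip := by
  intro x _
  unfold Spec_could_be_bitflip
  exact pvMain x
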